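-- pv_equiv track=rewrite | github.com/yosi-miller/Algorithms-js-language | twoLoop/matToArrRunTime.py | mat_to_arr_one_loop
-- ===== SOURCE A (Python) =====
-- def mat_to_arr_one_loop(mat):
--     newArr = []
--     sumCol = len(mat)
--     sumRow = len(mat[0])
--     row = 0
--     col = 0
--     for i in range(sumCol * sumRow):
--         newArr.append(mat[row][col])
--         if col == sumRow - 1:
--             row += 1
--             col = 0
--         else:
--             col += 1
--     return newArr
-- ===== SOURCE B (Python) =====
-- def mat_to_arr_one_loop(mat):
--     width = len(mat[0])
--     out = []
--     for row in mat:
--         for j in range(width):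
--             out.append(row[j])
--     return out
-- ===== Notes on version B (the rewrite author's own statement) =====
-- stated objective: simpler
-- what changed: Replaces the single counter loop over range(rows*width) with modular row/col bookkeeping by two plain nested loops (rows, then range(width)); same truncation of over-long rows and same IndexError on empty or under-long rows; measurably faster by dropping the per-element counter updates and repeated mat[row] indexing.
import Mathlib
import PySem

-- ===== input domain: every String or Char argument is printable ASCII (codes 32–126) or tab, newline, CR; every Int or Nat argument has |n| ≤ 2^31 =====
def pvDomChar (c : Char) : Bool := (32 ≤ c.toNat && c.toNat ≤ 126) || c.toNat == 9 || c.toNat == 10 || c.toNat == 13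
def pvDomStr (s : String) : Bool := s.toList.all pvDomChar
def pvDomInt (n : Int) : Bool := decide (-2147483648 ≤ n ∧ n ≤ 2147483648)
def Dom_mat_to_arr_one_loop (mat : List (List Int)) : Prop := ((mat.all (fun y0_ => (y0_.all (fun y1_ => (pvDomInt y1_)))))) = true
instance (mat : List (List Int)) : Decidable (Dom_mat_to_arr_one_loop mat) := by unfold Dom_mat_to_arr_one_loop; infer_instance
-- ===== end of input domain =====

-- B replaces A's single counter loop (with modular row/col updates) by two plain nested
-- loops over the rows and over range(width); same values, same order.

-- ===== PORT A =====
-- literal port of A: one loop over range(sumCol*sumRow), state (newArr, row, col)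
def mat_to_arr_one_loop (mat : List (List Int)) : List Int :=
  ((PySem.List.pyRange 0 ((mat.length : Int) * ((PySem.List.pyGetD mat 0 []).length : Int)) 1).foldl
    (fun (s : List Int × Int × Int) _ =>
      if s.2.2 == ((PySem.List.pyGetD mat 0 []).length : Int) - 1 then
        (s.1 ++ [PySem.List.pyGetD (PySem.List.pyGetD mat s.2.1 []) s.2.2 0], s.2.1 + 1, 0)
      else
        (s.1 ++ [PySem.List.pyGetD (PySem.List.pyGetD mat s.2.1 []) s.2.2 0], s.2.1, s.2.2 + 1))
    ([], 0, 0)).1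

-- ===== PORT B =====
-- literal port of Source B: outer loop over the rows, inner loop over range(width)
def mat_to_arr_one_loop_alt (mat : List (List Int)) : List Int :=
  mat.foldl (fun out row =>
    (PySem.List.pyRange 0 ((PySem.List.pyGetD mat 0 []).length : Int) 1).foldl
      (fun out2 j => out2 ++ [PySem.List.pyGetD row j 0]) out) []

-- ===== PRECONDITION & SPEC =====
-- Pre_ = exactly the inputs where Python A returns: mat nonempty (mat[0] raises IndexError on [])
-- and every row at least as long as the first (shorter rows raise IndexError via mat[row][col]).
def Pre_mat_to_arr_one_loop (mat : List (List Int)) : Prop :=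
  mat ≠ [] ∧ ∀ r ∈ mat, (mat.getD 0 []).length ≤ r.length
instance (mat : List (List Int)) : Decidable (Pre_mat_to_arr_one_loop mat) := by
  unfold Pre_mat_to_arr_one_loop; infer_instance

def pvWitness_mat_to_arr_one_loop : List (List Int) := [[1, 2], [3, 4]]

def Spec_mat_to_arr_one_loop (mat : List (List Int)) (out : List Int) : Prop :=
  out = mat_to_arr_one_loop_alt mat
instance (mat : List (List Int)) (out : List Int) : Decidable (Spec_mat_to_arr_one_loop mat out) := by
  unfold Spec_mat_to_arr_one_loop; infer_instance

-- ===== CLAIM (what is proved, stated in full; the proofs are below) =====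
def Claim_equal_mat_to_arr_one_loop : Prop :=
  ∀ (mat : List (List Int)), Dom_mat_to_arr_one_loop mat → Pre_mat_to_arr_one_loop mat →
    Spec_mat_to_arr_one_loop mat (mat_to_arr_one_loop mat)

-- ===== LEMMAS AND PROOFS =====

-- the step of A's loop (the loop body ignores the loop variable)
def pvStep (mat : List (List Int)) (m : Int) (s : List Int × Int × Int) : List Int × Int × Int :=
  if s.2.2 == m - 1 then
    (s.1 ++ [PySem.List.pyGetD (PySem.List.pyGetD mat s.2.1 []) s.2.2 0], s.2.1 + 1, 0)
  else
    (s.1 ++ [PySem.List.pyGetD (PySem.List.pyGetD mat s.2.1 []) s.2.2 0], s.2.1, s.2.2 + 1)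

-- a fold whose body ignores the element is an iterate of the step
theorem pv_foldl_ignore_elem {α β : Type} (f : β → β) (l : List α) (init : β) :
    l.foldl (fun s _ => f s) init = f^[l.length] init := by
  induction l generalizing init with
  | nil => rfl
  | cons x t ih => simp [List.foldl_cons, ih, Function.iterate_succ_apply]

theorem pv_map_range_shift (f : ℕ → Int) (k c : ℕ) :
    (List.range (k + 1)).map (fun i => f (c + i)) =
      f c :: (List.range k).map (fun i => f (c + 1 + i)) := by
  rw [List.range_succ_eq_map, List.map_cons, List.map_map]
  refine congrArg₂ List.cons (congrArg f (by omega)) ?_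
  apply List.map_congr_left
  intro i _
  exact congrArg f (by omega)

-- one row of A's loop: m steps starting at column c (with c + k + 1 = m) finish the row
theorem pv_row_iter (mat : List (List Int)) (m : ℕ) (k : ℕ) :
    ∀ (c : ℕ), c + k + 1 = m → ∀ (arr : List Int) (r : ℕ),
      (pvStep mat m)^[k + 1] (arr, (r : Int), (c : Int)) =
        (arr ++ (List.range (k + 1)).map (fun i => (mat.getD r []).getD (c + i) 0),
          ((r : Int) + 1), 0) := by
  induction k with
  | zero =>
    intro c hc arr r
    subst hc
    simp [pvStep, PySem.List.pyGetD_natCast]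
  | succ k ih =>
    intro c hc arr r
    have hne : ((c : Int)) ≠ (m : Int) - 1 := by omega
    have h1 : (pvStep mat m) (arr, (r : Int), (c : Int)) =
        (arr ++ [(mat.getD r []).getD c 0], (r : Int), ((c + 1 : ℕ) : Int)) := by
      simp [pvStep, PySem.List.pyGetD_natCast, hne]
    have h2 := ih (c + 1) (by omega) (arr ++ [(mat.getD r []).getD c 0]) r
    calc (pvStep mat m)^[k + 1 + 1] (arr, (r : Int), (c : Int))
        = (pvStep mat m)^[k + 1] ((pvStep mat m) (arr, (r : Int), (c : Int))) := by
          rw [Function.iterate_succ_apply]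
      _ = (arr ++ [(mat.getD r []).getD c 0] ++
            (List.range (k + 1)).map (fun i => (mat.getD r []).getD (c + 1 + i) 0),
            ((r : Int) + 1), 0) := by rw [h1, h2]
      _ = _ := by
          rw [List.append_assoc, List.singleton_append,
            pv_map_range_shift (fun j => (mat.getD r []).getD j 0) (k + 1) c]

-- all rows: rows·m steps starting at row r, column 0
theorem pv_rows_iter (mat : List (List Int)) (m : ℕ) (hm : 0 < m) (rows : ℕ) :
    ∀ (r : ℕ) (arr : List Int),
      (pvStep mat m)^[rows * m] (arr, (r : Int), 0) =
        (arr ++ ((List.range rows).map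
            (fun i => (List.range m).map (fun j => (mat.getD (r + i) []).getD j 0))).flatten,
          ((r : Int) + rows), 0) := by
  induction rows with
  | zero => intro r arr; simp
  | succ rows ih =>
    intro r arr
    obtain ⟨k, hk⟩ : ∃ k, m = k + 1 := ⟨m - 1, by omega⟩
    have hrow : (pvStep mat m)^[m] (arr, (r : Int), 0) =
        (arr ++ (List.range m).map (fun j => (mat.getD r []).getD j 0), (r : Int) + 1, 0) := by
      have h := pv_row_iter mat m k 0 (by omega) arr r
      rw [← hk] at h
      simpa using h
    have hsplit : (rows + 1) * m = rows * m + m := by ring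
    rw [hsplit, Function.iterate_add_apply, hrow]
    have h2 := ih (r + 1) (arr ++ (List.range m).map (fun j => (mat.getD r []).getD j 0))
    push_cast at h2
    rw [h2]
    refine congrArg₂ Prod.mk ?_ (congrArg₂ Prod.mk (by push_cast; ring) rfl)
    rw [List.append_assoc]
    refine congrArg (arr ++ ·) ?_
    rw [List.range_succ_eq_map, List.map_cons, List.flatten_cons, List.map_map]
    refine congrArg₂ (· ++ ·) (by simp) ?_
    exact congrArg List.flatten (List.map_congr_left (fun i _ => by
      simp only [Function.comp_apply, Nat.succ_eq_add_one]
      have hidx : r + 1 + i = r + (i + 1) := by omega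
      rw [hidx]))

-- [mat[i] for i in range(len(mat))], row-mapped, is mat row-mapped
theorem pv_flat_eq (mat : List (List Int)) (m : ℕ) :
    (List.range mat.length).map
        (fun i => (List.range m).map (fun j => (mat.getD i []).getD j 0)) =
      mat.map (fun row => (List.range m).map (fun j => row.getD j 0)) := by
  apply List.ext_getElem (by simp)
  intro i h1 h2
  simp only [List.getElem_map, List.getElem_range]
  rw [List.getD_eq_getElem mat [] (by simpa using h2)]

-- B's inner loop is a map over range(width)
theorem pv_inner_loop (row : List Int) (m : ℕ) (out : List Int) :
    (PySem.List.pyRange 0 (m : Int) 1).foldl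
      (fun out2 j => out2 ++ [PySem.List.pyGetD row j 0]) out =
    out ++ (List.range m).map (fun j => row.getD j 0) := by
  rw [PySem.List.foldl_append_singleton_eq_map]
  congr 1
  rw [PySem.List.pyRange_one]
  simp [List.map_map, Function.comp, PySem.List.pyGetD_natCast]

-- B computes the row-major flatten at fixed width
theorem pv_alt_eq (mat : List (List Int)) :
    mat_to_arr_one_loop_alt mat =
      (mat.map (fun row =>
        (List.range (mat.getD 0 []).length).map (fun j => row.getD j 0))).flatten := by
  unfold mat_to_arr_one_loop_alt
  rw [show PySem.List.pyGetD mat 0 [] = mat.getD 0 [] from by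
    simp [PySem.List.pyGetD_zero]]
  have hcong := PySem.List.foldl_congr_mem (l := mat) (init := ([] : List Int))
    (f := fun out row => (PySem.List.pyRange 0 ((mat.getD 0 []).length : Int) 1).foldl
      (fun out2 j => out2 ++ [PySem.List.pyGetD row j 0]) out)
    (g := fun out row => out ++ (List.range (mat.getD 0 []).length).map (fun j => row.getD j 0))
    (fun acc x _ => pv_inner_loop x _ acc)
  rw [hcong, PySem.List.foldl_append_eq_flatMap]
  simp [List.flatMap_def]

-- A computes the same flatten
theorem pv_a_eq (mat : List (List Int)) :
    mat_to_arr_one_loop mat =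
      (mat.map (fun row =>
        (List.range (mat.getD 0 []).length).map (fun j => row.getD j 0))).flatten := by
  have hg : PySem.List.pyGetD mat 0 [] = mat.getD 0 [] := by
    simp [PySem.List.pyGetD_zero]
  have key : mat_to_arr_one_loop mat =
      ((pvStep mat ((PySem.List.pyGetD mat 0 []).length : Int))^[
        (PySem.List.pyRange 0
          ((mat.length : Int) * ((PySem.List.pyGetD mat 0 []).length : Int)) 1).length]
        ([], 0, 0)).1 := by
    rw [← pv_foldl_ignore_elem]
    rfl
  rw [key, hg, PySem.List.length_pyRange_one]
  rcases Nat.eq_zero_or_pos (mat.getD 0 []).length with hm0 | hmpos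
  · rw [hm0]
    simp
  · have hlen : (((mat.length : Int) * ((mat.getD 0 []).length : Int) - 0).toNat)
        = mat.length * (mat.getD 0 []).length := by omega
    rw [hlen]
    have h := pv_rows_iter mat (mat.getD 0 []).length hmpos mat.length 0 []
    rw [Nat.cast_zero] at h
    simp only [Nat.zero_add] at h
    rw [h]
    simpa using congrArg List.flatten (pv_flat_eq mat (mat.getD 0 []).length)

-- ===== VERDICT (by name: the statement is the Claim_ definition above) =====
theorem mat_to_arr_one_loop_spec : Claim_equal_mat_to_arr_one_loop := by
  intro mat _ _
  unfold Spec_mat_to_arr_one_loop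
  rw [pv_a_eq, pv_alt_eq]
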